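-- pv_equiv track=rewrite | github.com/AlexiaO3107/laborator-5 | laborator_5_ie_1/functii_studenti.py | numar_unic
-- ===== SOURCE A (Python) =====
-- from collections import Counter
-- from typing import List
--
-- def numar_unic(lista: List[int]) -> str:
--     if not lista:
--         return "Eroare: lista este goală."
--     frecvente = Counter(lista)
--     o_data = [num for num, cnt in frecvente.items() if cnt == 1]
--     de_doua_ori = [num for num, cnt in frecvente.items() if cnt == 2]
--     if len(o_data) == 1 and len(o_data) + len(de_doua_ori) == len(frecvente):
--         return str(o_data[0])
--     else:
--         return "Eroare: condiția nu este respectată."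
-- ===== SOURCE B (Python) =====
-- def numar_unic(lista):
--     if not lista:
--         return "Eroare: lista este goal\u0103."
--     s = sorted(lista)
--     n = len(s)
--     singles = 0
--     singleton = 0
--     bad = False
--     i = 0
--     while i < n:
--         j = i + 1
--         while j < n and s[j] == s[i]:
--             j += 1
--         if j - i == 1:
--             singles += 1
--             singleton = s[i]
--         elif j - i > 2:
--             bad = True
--         i = j
--     if singles == 1 and not bad:
--         return str(singleton)
--     return "Eroare: condi\u021bia nu este respectat\u0103."
-- ===== Notes on version B (the rewrite author's own statement) =====
-- stated objective: alternative
-- what changed: Replaces A's Counter/frequency-dict and its two filtered item lists by sorting a copy of the list and scanning maximal runs of equal consecutive values, counting length-1 runs (remembering that value) and flagging any run longer than 2.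
import Mathlib
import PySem

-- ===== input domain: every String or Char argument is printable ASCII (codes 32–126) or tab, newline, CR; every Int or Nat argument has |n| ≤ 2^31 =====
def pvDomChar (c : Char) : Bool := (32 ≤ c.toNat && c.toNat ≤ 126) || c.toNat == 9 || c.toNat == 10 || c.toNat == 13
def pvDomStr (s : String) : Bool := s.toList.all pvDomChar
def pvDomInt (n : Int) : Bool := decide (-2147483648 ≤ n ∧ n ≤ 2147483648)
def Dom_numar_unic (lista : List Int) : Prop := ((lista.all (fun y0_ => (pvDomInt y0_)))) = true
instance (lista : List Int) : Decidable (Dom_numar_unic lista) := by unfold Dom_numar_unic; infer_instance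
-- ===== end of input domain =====

-- B replaces A's Counter/frequency dict by sorting a copy of the list and scanning the
-- maximal runs of equal consecutive values — an alternative algorithm, same return value.

-- ===== PORT A =====
def numar_unic (lista : List Int) : String :=
  if lista = [] then
    "Eroare: lista este goală."
  else
    let frecvente := PySem.Dict.counter lista
    let o_data := (frecvente.items.filter (fun p => p.2 == 1)).map (fun p => p.1)
    let de_doua_ori := (frecvente.items.filter (fun p => p.2 == 2)).map (fun p => p.1)
    if o_data.length = 1 ∧ o_data.length + de_doua_ori.length = frecvente.size then
      PySem.Int.toStr ((PySem.List.pyGet? o_data 0).getD 0)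
    else
      "Eroare: condiția nu este respectată."

-- ===== PORT B =====
-- the outer while loop over runs of Source B; the inner while loop advancing j over the
-- elements equal to s[i] is the takeWhile/dropWhile split of the remaining suffix
def scanRuns : List Int → Nat → Int → Bool → Nat × Int × Bool
  | [], singles, singleton, bad => (singles, singleton, bad)
  | x :: rest, singles, singleton, bad =>
    let same := rest.takeWhile (fun y => y == x)
    let t := rest.dropWhile (fun y => y == x)
    let L := same.length + 1
    if L = 1 then scanRuns t (singles + 1) x bad
    else if L > 2 then scanRuns t singles singleton true
    else scanRuns t singles singleton bad
termination_by s _ _ _ => s.length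
decreasing_by
  all_goals
    (have h := List.length_dropWhile_le (fun y => y == x) rest
     simp only [List.length_cons]; omega)

def numar_unic_alt (lista : List Int) : String :=
  if lista = [] then
    "Eroare: lista este goală."
  else
    let s := PySem.List.sorted lista (fun x => x) false
    let r := scanRuns s 0 0 false
    if r.1 = 1 ∧ r.2.2 = false then
      PySem.Int.toStr r.2.1
    else
      "Eroare: condiția nu este respectată."

-- ===== PRECONDITION & SPEC =====
def Spec_numar_unic (lista : List Int) (out : String) : Prop := out = numar_unic_alt lista
instance (lista : List Int) (out : String) : Decidable (Spec_numar_unic lista out) := by unfold Spec_numar_unic; infer_instance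

-- ===== CLAIM (what is proved, stated in full; the proofs are below) =====
def Claim_equal_numar_unic : Prop := ∀ (lista : List Int), Dom_numar_unic lista → Spec_numar_unic lista (numar_unic lista)

-- ===== LEMMAS AND PROOFS =====

theorem not_mem_dropWhile_head (x : Int) (rest : List Int)
    (hs : (x :: rest).Pairwise (· ≤ ·)) :
    x ∉ rest.dropWhile (fun y => y == x) := by
  intro hx
  set t := rest.dropWhile (fun y => y == x) with ht
  have hne : t ≠ [] := by intro h; rw [h] at hx; exact absurd hx (List.not_mem_nil)
  have hhead := List.head_dropWhile_not (fun y => y == x) (l := rest) (by rw [← ht]; exact hne)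
  have hhx : t.head hne ≠ x := by simpa [ht] using hhead
  have hmem : t.head hne ∈ rest := (List.dropWhile_sublist _).mem (List.head_mem hne)
  have h1 : x ≤ t.head hne := (List.pairwise_cons.mp hs).1 _ hmem
  have h2 : t.Pairwise (· ≤ ·) :=
    List.Pairwise.sublist (List.dropWhile_sublist _) (List.pairwise_cons.mp hs).2
  have hcons : t.head hne :: t.tail = t := List.cons_head_tail hne
  rw [← hcons] at hx h2
  rcases List.mem_cons.mp hx with h | h
  · exact hhx h.symm
  · exact hhx (le_antisymm ((List.pairwise_cons.mp h2).1 x h) h1)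

theorem count_tail_run (x z : Int) (rest : List Int) (hz : z ≠ x) :
    (x :: rest).count z = (rest.dropWhile (fun y => y == x)).count z := by
  have htake : (rest.takeWhile (fun y => y == x)).count z = 0 := by
    rw [List.count_eq_zero]
    intro hzmem
    exact hz (by simpa using List.mem_takeWhile_imp hzmem)
  have hxz : ¬ x = z := fun h => hz h.symm
  have hsplit : rest.count z
      = (rest.takeWhile (fun y => y == x)).count z + (rest.dropWhile (fun y => y == x)).count z := by
    rw [← List.count_append, List.takeWhile_append_dropWhile]
  simp only [List.count_cons, beq_iff_eq, if_neg hxz]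
  omega

theorem count_head_run (x : Int) (rest : List Int)
    (hs : (x :: rest).Pairwise (· ≤ ·)) :
    (x :: rest).count x = (rest.takeWhile (fun y => y == x)).length + 1 := by
  have hdrop : (rest.dropWhile (fun y => y == x)).count x = 0 := by
    rw [List.count_eq_zero]
    exact not_mem_dropWhile_head x rest hs
  have htake : (rest.takeWhile (fun y => y == x)).count x
      = (rest.takeWhile (fun y => y == x)).length := by
    rw [List.count_eq_length]
    intro b hb
    have := List.mem_takeWhile_imp hb
    exact ((by simpa using this : b = x)).symm
  have hsplit : rest.count x
      = (rest.takeWhile (fun y => y == x)).count x + (rest.dropWhile (fun y => y == x)).count x := by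
    rw [← List.count_append, List.takeWhile_append_dropWhile]
  simp only [List.count_cons, beq_self_eq_true, if_pos]
  omega

theorem mem_iff_head_or_tail (x z : Int) (rest : List Int) :
    z ∈ x :: rest ↔ z = x ∨ z ∈ rest.dropWhile (fun y => y == x) := by
  constructor
  · intro h
    rcases List.mem_cons.mp h with h | h
    · exact Or.inl h
    · conv at h => rw [← List.takeWhile_append_dropWhile (p := fun y => y == x) (l := rest)]
      rcases List.mem_append.mp h with h | h
      · exact Or.inl (by simpa using List.mem_takeWhile_imp h)
      · exact Or.inr h
  · rintro (h | h)
    · simp [h]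
    · exact List.mem_cons_of_mem _ ((List.dropWhile_sublist _).mem h)

def Sct (s : List Int) : Nat := (s.toFinset.filter (fun k => s.count k = 1)).card

theorem toFinset_step (x : Int) (rest : List Int) :
    (x :: rest).toFinset = insert x (rest.dropWhile (fun y => y == x)).toFinset := by
  ext z
  simp only [List.mem_toFinset, Finset.mem_insert]
  exact mem_iff_head_or_tail x z rest

theorem Sct_step (x : Int) (rest : List Int) (hs : (x :: rest).Pairwise (· ≤ ·)) :
    Sct (x :: rest) = (if (x :: rest).count x = 1 then 1 else 0)
      + Sct (rest.dropWhile (fun y => y == x)) := by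
  have hxt : x ∉ (rest.dropWhile (fun y => y == x)).toFinset := by
    simpa using not_mem_dropWhile_head x rest hs
  have hfc : (rest.dropWhile (fun y => y == x)).toFinset.filter (fun k => (x :: rest).count k = 1)
      = (rest.dropWhile (fun y => y == x)).toFinset.filter
          (fun k => (rest.dropWhile (fun y => y == x)).count k = 1) := by
    apply Finset.filter_congr
    intro z hz
    have hzx : z ≠ x := fun h => hxt (h ▸ hz)
    rw [count_tail_run x z rest hzx]
  unfold Sct
  rw [toFinset_step, Finset.filter_insert]
  by_cases hc : (x :: rest).count x = 1
  · rw [if_pos hc, if_pos hc, Finset.card_insert_of_notMem (by simp [hxt]), hfc]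
    omega
  · rw [if_neg hc, if_neg hc, hfc]
    omega

theorem any_step (x : Int) (rest : List Int) (hs : (x :: rest).Pairwise (· ≤ ·)) :
    ((x :: rest).any (fun z => decide (2 < (x :: rest).count z)))
      = (decide (2 < (x :: rest).count x)
          || (rest.dropWhile (fun y => y == x)).any
               (fun z => decide (2 < (rest.dropWhile (fun y => y == x)).count z))) := by
  set t := rest.dropWhile (fun y => y == x) with ht
  rcases Bool.eq_false_or_eq_true ((x :: rest).any (fun z => decide (2 < (x :: rest).count z))) with h | h
  all_goals rw [h]
  case inr =>
    rw [List.any_eq_false] at h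
    have h1 : ¬ 2 < (x :: rest).count x := by simpa using h x (List.mem_cons_self)
    have h2 : t.any (fun z => decide (2 < t.count z)) = false := by
      rw [List.any_eq_false]
      intro z hz
      have hzx : z ≠ x := fun he => not_mem_dropWhile_head x rest hs (by rwa [he] at hz)
      have hmem : z ∈ x :: rest := (mem_iff_head_or_tail x z rest).mpr (Or.inr hz)
      have := h z hmem
      rwa [← count_tail_run x z rest hzx]
    rw [h2, Bool.or_false]
    exact (decide_eq_false h1).symm
  case inl =>
    rw [List.any_eq_true] at h
    obtain ⟨z, hz, hcnt⟩ := h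
    simp only [decide_eq_true_eq] at hcnt
    rcases (mem_iff_head_or_tail x z rest).mp hz with he | hmem
    · rw [he] at hcnt
      rw [decide_eq_true hcnt, Bool.true_or]
    · have hzx : z ≠ x := fun he => not_mem_dropWhile_head x rest hs (by rwa [he] at hmem)
      have : (2 < t.count z) := by rwa [← count_tail_run x z rest hzx]
      have h2 : t.any (fun z => decide (2 < t.count z)) = true :=
        List.any_eq_true.mpr ⟨z, hmem, by simpa using this⟩
      rw [h2, Bool.or_true]

theorem scanRuns_inv (n : Nat) : ∀ (s : List Int), s.length ≤ n →
    s.Pairwise (· ≤ ·) → ∀ (a : Nat) (v : Int) (b : Bool),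
    (scanRuns s a v b).1 = a + Sct s ∧
    (scanRuns s a v b).2.2 = (b || s.any (fun z => decide (2 < s.count z))) ∧
    (((scanRuns s a v b).2.1 = v ∧ (scanRuns s a v b).1 = a) ∨
     ((scanRuns s a v b).2.1 ∈ s ∧ s.count (scanRuns s a v b).2.1 = 1)) := by
  induction n with
  | zero =>
    intro s hn hs a v b
    have : s = [] := List.eq_nil_of_length_eq_zero (Nat.le_zero.mp hn)
    subst this
    simp [scanRuns, Sct]
  | succ n ih =>
    intro s hn hs a v b
    match s with
    | [] => simp [scanRuns, Sct]
    | x :: rest =>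
      have hcount := count_head_run x rest hs
      have htlen : (rest.dropWhile (fun y => y == x)).length ≤ n := by
        have := List.length_dropWhile_le (fun y => y == x) rest
        simp only [List.length_cons] at hn
        omega
      have htsorted : (rest.dropWhile (fun y => y == x)).Pairwise (· ≤ ·) :=
        List.Pairwise.sublist (List.Sublist.trans (List.dropWhile_sublist _) (List.sublist_cons_self x rest)) hs
      set t := rest.dropWhile (fun y => y == x) with htdef
      have hSct := Sct_step x rest hs
      have hany := any_step x rest hs
      rw [← htdef] at hSct hany
      -- lift the third conjunct from t to x :: rest
      have hlift : ∀ (r : Nat × Int × Bool), (r.2.1 ∈ t ∧ t.count r.2.1 = 1) →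
          (r.2.1 ∈ x :: rest ∧ (x :: rest).count r.2.1 = 1) := by
        intro r ⟨hm, hc⟩
        have hzx : r.2.1 ≠ x := fun he => not_mem_dropWhile_head x rest hs (by rwa [he] at hm)
        exact ⟨(mem_iff_head_or_tail x r.2.1 rest).mpr (Or.inr hm),
               by rw [count_tail_run x r.2.1 rest hzx]; exact hc⟩
      by_cases h1 : (rest.takeWhile (fun y => y == x)).length + 1 = 1
      · have hrun : scanRuns (x :: rest) a v b = scanRuns t (a + 1) x b := by
          simp only [scanRuns]; rw [if_pos h1]
        have hc1 : (x :: rest).count x = 1 := by omega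
        obtain ⟨i1, i2, i3⟩ := ih t htlen htsorted (a + 1) x b
        refine ⟨?_, ?_, ?_⟩
        · rw [hrun, i1, hSct, if_pos hc1]; omega
        · rw [hrun, i2, hany, hc1]
          norm_num
        · rw [hrun]
          rcases i3 with ⟨hv, ha⟩ | h2
          · exact Or.inr ⟨by rw [hv]; exact List.mem_cons_self, by rw [hv]; exact hc1⟩
          · exact Or.inr (hlift _ h2)
      · by_cases h2 : (rest.takeWhile (fun y => y == x)).length + 1 > 2
        · have hrun : scanRuns (x :: rest) a v b = scanRuns t a v true := by
            simp only [scanRuns]; rw [if_neg h1, if_pos h2]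
          have hc1 : (x :: rest).count x ≠ 1 := by omega
          have hc2 : 2 < (x :: rest).count x := by omega
          obtain ⟨i1, i2, i3⟩ := ih t htlen htsorted a v true
          refine ⟨?_, ?_, ?_⟩
          · rw [hrun, i1, hSct, if_neg hc1]; omega
          · rw [hrun, i2, hany, decide_eq_true hc2]
            simp
          · rw [hrun]
            rcases i3 with ⟨hv, ha⟩ | hh
            · exact Or.inl ⟨hv, by rw [ha]⟩
            · exact Or.inr (hlift _ hh)
        · have hrun : scanRuns (x :: rest) a v b = scanRuns t a v b := by
            simp only [scanRuns]; rw [if_neg h1, if_neg h2]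
          have hc1 : (x :: rest).count x ≠ 1 := by omega
          have hc2 : ¬ 2 < (x :: rest).count x := by omega
          obtain ⟨i1, i2, i3⟩ := ih t htlen htsorted a v b
          refine ⟨?_, ?_, ?_⟩
          · rw [hrun, i1, hSct, if_neg hc1]; omega
          · rw [hrun, i2, hany, decide_eq_false hc2]
            simp
          · rw [hrun]
            rcases i3 with ⟨hv, ha⟩ | hh
            · exact Or.inl ⟨hv, by rw [ha]⟩
            · exact Or.inr (hlift _ hh)

theorem length_filter_eq_card (l L : List Int) (p : Int → Bool)
    (hn : l.Nodup) (hm : ∀ z, z ∈ l ↔ z ∈ L) :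
    (l.filter p).length = (L.toFinset.filter (fun z => p z)).card := by
  rw [← List.toFinset_card_of_nodup (hn.filter p), List.toFinset_filter]
  congr 1
  ext z
  simp [hm z]

theorem card_filter_add_card_filter_eq_iff (F : Finset Int) (p q : Int → Prop)
    [DecidablePred p] [DecidablePred q] (hd : ∀ z, ¬(p z ∧ q z)) :
    ((F.filter p).card + (F.filter q).card = F.card ↔ ∀ z ∈ F, p z ∨ q z) := by
  have hdisj : Disjoint (F.filter p) (F.filter q) := by
    rw [Finset.disjoint_left]
    intro z hz1 hz2
    exact hd z ⟨(Finset.mem_filter.mp hz1).2, (Finset.mem_filter.mp hz2).2⟩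
  rw [← Finset.card_union_of_disjoint hdisj, ← Finset.filter_or]
  constructor
  · intro h z hz
    have := Finset.eq_of_subset_of_card_le (Finset.filter_subset _ F) (le_of_eq h.symm)
    rw [← this] at hz
    exact (Finset.mem_filter.mp hz).2
  · intro h
    rw [Finset.filter_true_of_mem h]

-- ===== VERDICT (by name: the statement is the Claim_ definition above) =====
theorem numar_unic_spec : Claim_equal_numar_unic := by
  intro lista _
  unfold Spec_numar_unic
  unfold numar_unic numar_unic_alt
  by_cases hnil : lista = []
  · simp [hnil]
  simp only [if_neg hnil]
  -- A-side massage: o_data / de_doua_ori as filters of the dedup list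
  have hitems : (PySem.Dict.counter lista).items
      = (PySem.Set.ofList lista).map (fun k => (k, (lista.count k : Int))) :=
    PySem.Dict.items_counter lista
  have hsize : (PySem.Dict.counter lista).size = (PySem.Set.ofList lista).length := by
    simp [PySem.Dict.size, hitems]
  simp only [hitems, hsize, List.filter_map, List.map_map]
  simp only [Function.comp_def, List.map_id']
  have hcast1 : (fun k : Int => ((lista.count k : Int) == 1)) = (fun k => lista.count k == 1) := by
    funext k
    simp [beq_eq_decide, Nat.cast_eq_one]
  have hcast2 : (fun k : Int => ((lista.count k : Int) == 2)) = (fun k => lista.count k == 2) := by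
    funext k
    simp [beq_eq_decide]
    omega
  rw [hcast1, hcast2]
  -- the common Finset measures
  have hnodup : (PySem.Set.ofList lista).Nodup := PySem.Set.nodup_ofList lista
  have hmem : ∀ z, z ∈ PySem.Set.ofList lista ↔ z ∈ lista := fun z => PySem.Set.mem_ofList lista z
  have hN1 : ((PySem.Set.ofList lista).filter (fun k => lista.count k == 1)).length
      = (lista.toFinset.filter (fun z => lista.count z = 1)).card := by
    rw [length_filter_eq_card _ lista _ hnodup hmem]
    congr 1
    apply Finset.filter_congr
    intro z _
    simp
  have hN2 : ((PySem.Set.ofList lista).filter (fun k => lista.count k == 2)).length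
      = (lista.toFinset.filter (fun z => lista.count z = 2)).card := by
    rw [length_filter_eq_card _ lista _ hnodup hmem]
    congr 1
    apply Finset.filter_congr
    intro z _
    simp
  have hFcard : (PySem.Set.ofList lista).length = lista.toFinset.card := by
    rw [← List.toFinset_card_of_nodup hnodup]
    congr 1
    ext z
    simp [hmem z]
  -- B-side: the sorted copy
  have hperm : (PySem.List.sorted lista (fun x => x) false).Perm lista :=
    PySem.List.sorted_perm lista (fun x => x) false
  have hsorted : (PySem.List.sorted lista (fun x => x) false).Pairwise (· ≤ ·) :=
    PySem.List.sorted_pairwise lista (fun x => x)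
  set s := PySem.List.sorted lista (fun x => x) false with hsdef
  obtain ⟨i1, i2, i3⟩ := scanRuns_inv s.length s (le_refl _) hsorted 0 0 false
  have hSctN : Sct s = (lista.toFinset.filter (fun z => lista.count z = 1)).card := by
    unfold Sct
    rw [List.toFinset_eq_of_perm _ _ hperm]
    congr 1
    apply Finset.filter_congr
    intro z _
    rw [hperm.count_eq]
  have hanyiff : (s.any (fun z => decide (2 < s.count z))) = false
      ↔ ∀ z ∈ lista, lista.count z ≤ 2 := by
    rw [List.any_eq_false]
    constructor
    · intro h z hz
      have := h z (hperm.mem_iff.mpr hz)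
      simp only [decide_eq_true_eq] at this
      rw [hperm.count_eq] at this
      omega
    · intro h z hz
      have := h z (hperm.mem_iff.mp hz)
      simp only [decide_eq_true_eq]
      rw [hperm.count_eq]
      omega
  -- condition equivalence
  have hcover := card_filter_add_card_filter_eq_iff lista.toFinset
    (fun z => lista.count z = 1) (fun z => lista.count z = 2) (fun z hz => by omega)
  have hcond : (((PySem.Set.ofList lista).filter (fun k => lista.count k == 1)).length = 1 ∧
        ((PySem.Set.ofList lista).filter (fun k => lista.count k == 1)).length
          + ((PySem.Set.ofList lista).filter (fun k => lista.count k == 2)).length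
          = (PySem.Set.ofList lista).length)
      ↔ ((scanRuns s 0 0 false).1 = 1 ∧ (scanRuns s 0 0 false).2.2 = false) := by
    rw [hN1, hN2, hFcard, i1, i2, Bool.false_or, hSctN, hanyiff]
    constructor
    · rintro ⟨h1, h2⟩
      refine ⟨by omega, ?_⟩
      intro z hz
      have hzF : z ∈ lista.toFinset := List.mem_toFinset.mpr hz
      rcases hcover.mp h2 z hzF with h | h <;> omega
    · rintro ⟨h1, h2⟩
      refine ⟨by omega, ?_⟩
      apply hcover.mpr
      intro z hzF
      have hz : z ∈ lista := List.mem_toFinset.mp hzF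
      have hle := h2 z hz
      have hpos : 0 < lista.count z := List.count_pos_iff.mpr hz
      omega
  by_cases hA : ((PySem.Set.ofList lista).filter (fun k => lista.count k == 1)).length = 1 ∧
        ((PySem.Set.ofList lista).filter (fun k => lista.count k == 1)).length
          + ((PySem.Set.ofList lista).filter (fun k => lista.count k == 2)).length
          = (PySem.Set.ofList lista).length
  · have hB := hcond.mp hA
    rw [if_pos hA, if_pos hB]
    -- both returned values are THE unique element of multiplicity one
    obtain ⟨u, hu⟩ := List.length_eq_one_iff.mp hA.1
    have huget : (PySem.List.pyGet? ((PySem.Set.ofList lista).filter (fun k => lista.count k == 1)) 0).getD 0 = u := by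
      rw [hu]
      rfl
    rw [huget]
    have humem : u ∈ lista.toFinset.filter (fun z => lista.count z = 1) := by
      have : u ∈ (PySem.Set.ofList lista).filter (fun k => lista.count k == 1) := by
        rw [hu]; exact List.mem_cons_self
      have h1 := List.mem_filter.mp this
      refine Finset.mem_filter.mpr ⟨List.mem_toFinset.mpr ((hmem u).mp h1.1), by simpa using h1.2⟩
    have hv : (scanRuns s 0 0 false).2.1 ∈ s ∧ s.count (scanRuns s 0 0 false).2.1 = 1 := by
      rcases i3 with ⟨_, ha⟩ | h
      · rw [hB.1] at ha
        exact absurd ha one_ne_zero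
      · exact h
    have hvmem : (scanRuns s 0 0 false).2.1 ∈ lista.toFinset.filter (fun z => lista.count z = 1) := by
      refine Finset.mem_filter.mpr ⟨List.mem_toFinset.mpr (hperm.mem_iff.mp hv.1), ?_⟩
      rw [← hperm.count_eq]
      exact hv.2
    have hcard1 : (lista.toFinset.filter (fun z => lista.count z = 1)).card = 1 := by
      rw [← hN1]; exact hA.1
    obtain ⟨w, hw⟩ := Finset.card_eq_one.mp hcard1
    rw [hw] at humem hvmem
    have : u = (scanRuns s 0 0 false).2.1 := by
      rw [Finset.mem_singleton.mp humem, Finset.mem_singleton.mp hvmem]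
    rw [this]
  · rw [if_neg hA, if_neg (fun h => hA (hcond.mpr h))]
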